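-- pv_equiv track=rewrite | github.com/Byakko/mermaid | sanitize_mermaid.py | _extract_gantt_task_statuses
-- ===== SOURCE A (Python) =====
-- _GANTT_STATUS_KEYWORDS = {'done', 'active', 'crit', 'milestone', 'vert'}
--
-- def _extract_gantt_task_statuses(parts: list) -> tuple:
--     """
--     First pass: extract status keywords from front of parts list.
--
--     Args:
--         parts: List of comma-separated task parts (after the colon)
--
--     Returns:
--         Tuple of (statuses list, index of first non-status part).
--         If all parts are statuses, index equals len(parts).
--     """
--     statuses = []
--     first_non_status = len(parts)
--     for i, part in enumerate(parts):
--         if not part: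
--             continue
--         if part.lower() in _GANTT_STATUS_KEYWORDS:
--             statuses.append(part.lower())
--         else:
--             first_non_status = i
--             break
--     return statuses, first_non_status
-- ===== SOURCE B (Python) =====
-- _GANTT_STATUS_KEYWORDS = {'done', 'active', 'crit', 'milestone', 'vert'}
--
-- def _extract_gantt_task_statuses(parts: list) -> tuple:
--     """Compute the boundary index first, then materialise the status list."""
--     first_non_status = len(parts)
--     for i, part in enumerate(parts):
--         if part and part.lower() not in _GANTT_STATUS_KEYWORDS:
--             first_non_status = i
--             break
--     statuses = [p.lower() for p in parts[:first_non_status] if p]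
--     return statuses, first_non_status
-- ===== Notes on version B (the rewrite author's own statement) =====
-- stated objective: alternative
-- what changed: B first locates the boundary index of the first non-empty non-keyword part, then builds the status list with a separate filter-and-lower comprehension over the prefix, instead of A's single loop interleaving append with break.
import Mathlib
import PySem

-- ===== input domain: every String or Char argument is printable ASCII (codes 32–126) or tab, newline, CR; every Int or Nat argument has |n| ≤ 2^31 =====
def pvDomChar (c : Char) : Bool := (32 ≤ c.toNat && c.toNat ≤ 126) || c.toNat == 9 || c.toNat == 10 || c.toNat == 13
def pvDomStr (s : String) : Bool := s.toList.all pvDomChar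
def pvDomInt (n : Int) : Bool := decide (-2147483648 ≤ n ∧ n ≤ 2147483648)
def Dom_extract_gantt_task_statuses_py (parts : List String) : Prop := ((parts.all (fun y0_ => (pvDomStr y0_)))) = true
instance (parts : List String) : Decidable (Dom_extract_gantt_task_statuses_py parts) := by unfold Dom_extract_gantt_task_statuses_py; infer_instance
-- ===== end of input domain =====

-- B computes the boundary index first, then builds the status list in a separate prefix pass (alternative decomposition, same cost).


-- ===== PORT A =====
def pvKw : List String := ["done", "active", "crit", "milestone", "vert"]

-- A's for-loop over enumerate(parts): index counter, accumulated statuses, default first_non_status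
def pvLoopA : List String → Int → List String → Int → List String × Int
  | [], _, statuses, first_non_status => (statuses, first_non_status)
  | part :: rest, i, statuses, first_non_status =>
    if part = "" then pvLoopA rest (i + 1) statuses first_non_status
    else if PySem.Str.lower part ∈ pvKw then
      pvLoopA rest (i + 1) (statuses ++ [PySem.Str.lower part]) first_non_status
    else (statuses, i)

def extract_gantt_task_statuses_py (parts : List String) : List String × Int :=
  pvLoopA parts 0 [] (parts.length : Int)

-- ===== PORT B =====
-- B's first loop: index of the first non-empty part whose lowercase is not a keyword, else len(parts)
def pvFirstNonStatus : List String → Nat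
  | [] => 0
  | part :: rest =>
    if part ≠ "" ∧ PySem.Str.lower part ∉ pvKw then 0 else 1 + pvFirstNonStatus rest

def extract_gantt_task_statuses_py_alt (parts : List String) : List String × Int :=
  let first_non_status := pvFirstNonStatus parts
  (((parts.take first_non_status).filter (fun p => p ≠ "")).map PySem.Str.lower,
   (first_non_status : Int))

-- ===== PRECONDITION & SPEC =====
def Spec_extract_gantt_task_statuses_py (parts : List String) (out : List String × Int) : Prop := out = extract_gantt_task_statuses_py_alt parts
instance (parts : List String) (out : List String × Int) : Decidable (Spec_extract_gantt_task_statuses_py parts out) := by unfold Spec_extract_gantt_task_statuses_py; infer_instance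

-- ===== CLAIM (what is proved, stated in full; the proofs are below) =====
def Claim_equal_extract_gantt_task_statuses_py : Prop := ∀ (parts : List String), Dom_extract_gantt_task_statuses_py parts → Spec_extract_gantt_task_statuses_py parts (extract_gantt_task_statuses_py parts)

-- ===== LEMMAS AND PROOFS =====
lemma pvLoopA_eq (parts : List String) : ∀ (i : Int) (acc : List String) (d : Int),
    pvLoopA parts i acc d =
      (acc ++ ((parts.take (pvFirstNonStatus parts)).filter (fun p => p ≠ "")).map PySem.Str.lower,
       if pvFirstNonStatus parts = parts.length then d else i + (pvFirstNonStatus parts : Int)) := by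
  induction parts with
  | nil => intro i acc d; simp [pvLoopA, pvFirstNonStatus]
  | cons part rest ih =>
    intro i acc d
    by_cases hp : part = ""
    · subst hp
      have hf : pvFirstNonStatus ("" :: rest) = pvFirstNonStatus rest + 1 := by
        simp [pvFirstNonStatus, Nat.add_comm]
      rw [show pvLoopA ("" :: rest) i acc d = pvLoopA rest (i + 1) acc d from by
        simp [pvLoopA]]
      rw [ih, hf, List.take_succ_cons]
      refine Prod.ext ?_ ?_
      · simp
      · simp only [List.length_cons]
        split_ifs <;> omega
    · by_cases hk : PySem.Str.lower part ∈ pvKw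
      · have hf : pvFirstNonStatus (part :: rest) = pvFirstNonStatus rest + 1 := by
          simp [pvFirstNonStatus, hk, Nat.add_comm]
        rw [show pvLoopA (part :: rest) i acc d
              = pvLoopA rest (i + 1) (acc ++ [PySem.Str.lower part]) d from by
          simp [pvLoopA, hp, hk]]
        rw [ih, hf, List.take_succ_cons]
        refine Prod.ext ?_ ?_
        · simp [hp]
        · simp only [List.length_cons]
          split_ifs <;> omega
      · have hc : part ≠ "" ∧ PySem.Str.lower part ∉ pvKw := ⟨hp, hk⟩
        simp [pvLoopA, pvFirstNonStatus, hp, hk]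


-- ===== VERDICT (by name: the statement is the Claim_ definition above) =====
theorem extract_gantt_task_statuses_py_spec : Claim_equal_extract_gantt_task_statuses_py := by
  intro parts _
  unfold Spec_extract_gantt_task_statuses_py extract_gantt_task_statuses_py extract_gantt_task_statuses_py_alt
  rw [pvLoopA_eq]
  simp only [List.nil_append]
  by_cases h : pvFirstNonStatus parts = parts.length
  · simp [h]
  · simp [h]
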